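-- pv_equiv track=rewrite | github.com/hynky1999/Skola | 2.semestr-MFFUK/ADS/algos/podposloupnost.py | average_with_memo
-- ===== SOURCE A (Python) =====
-- def average_with_memo(seq):
--     memo_list = [0 for _ in range(len(seq))]
--     maximum = 0
--
--     def max_from(index):
--         d = 1
--         for i in range(index + 1, len(seq)):
--             new_d = d
--             if seq[index] < seq[i]:
--                 if memo_list[i] > 0:
--                     new_d = memo_list[i]
--
--                 else:
--                     new_d = max_from(i) + 1
--                     memo_list[i] = new_d
--
--             d = max(new_d, d)
--
--         return d
--
--     for i in range(len(seq)):
--         #TODO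
--         maximum = max(max_from(i), maximum)
--
--     return maximum
-- ===== SOURCE B (Python) =====
-- def average_with_memo(seq):
--     # Single bottom-up reverse pass: for each element the LIS length starting
--     # there is computed once from the already-processed suffix entries.
--     # (all lengths stored are >= 1, so max(..., default=0) is the true max)
--     suffix = []  # (value, LIS length starting at that element) for later elements
--     best = 0
--     for x in reversed(seq):
--         d = 1 + max((l for v, l in suffix if x < v), default=0)
--         suffix.append((x, d))
--         best = max(best, d)
--     return best
-- ===== Notes on version B (the rewrite author's own statement) =====
-- stated objective: faster
-- what changed: replaces the nested memoized recursion (whose outer loop rescans every suffix again for each start index) by a single bottom-up reverse pass that computes each suffix-LIS value exactly once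
import Mathlib
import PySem

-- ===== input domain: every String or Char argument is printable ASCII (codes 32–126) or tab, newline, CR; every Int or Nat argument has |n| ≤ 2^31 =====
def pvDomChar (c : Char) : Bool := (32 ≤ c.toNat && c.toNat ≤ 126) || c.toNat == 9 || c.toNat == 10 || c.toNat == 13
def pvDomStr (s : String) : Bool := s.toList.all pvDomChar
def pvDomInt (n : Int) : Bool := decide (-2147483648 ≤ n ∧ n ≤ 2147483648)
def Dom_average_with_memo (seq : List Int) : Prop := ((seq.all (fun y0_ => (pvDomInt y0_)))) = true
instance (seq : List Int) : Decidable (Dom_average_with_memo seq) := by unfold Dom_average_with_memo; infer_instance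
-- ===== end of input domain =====

-- B replaces A's memoized nested recursion (whose outer loop rescans every suffix per start
-- index) by one bottom-up reverse pass computing each suffix-LIS value once: same values, simpler.

-- ===== PORT A =====
-- pvA seq fuel index i d memo: A's inner function max_from(index), continuing its loop at
-- position i with accumulator d and the shared memo list.  All list indices A uses are in
-- range, so List.getD is exact; fuel only makes the nested recursion structural (the port
-- always passes enough fuel, so the fuel-0 branch is unreachable).
def pvA (seq : List Int) (fuel index i : Nat) (d : Int) (memo : List Int) : Int × List Int :=
  if h : i < seq.length then
    if seq.getD index 0 < seq.getD i 0 then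
      if 0 < memo.getD i 0 then
        pvA seq fuel index (i+1) (max (memo.getD i 0) d) memo
      else
        match fuel with
        | 0 => (d, memo)  -- unreachable fuel guard
        | fuel'+1 =>
          match pvA seq fuel' i (i+1) 1 memo with
          | (v, memo1) => pvA seq (fuel'+1) index (i+1) (max (v+1) d) (memo1.set i (v+1))
    else pvA seq fuel index (i+1) d memo
  else (d, memo)
termination_by (fuel, seq.length - i)
decreasing_by
  · exact Prod.Lex.right fuel (by omega)
  · exact Prod.Lex.left _ _ (by omega)
  · exact Prod.Lex.right (fuel'+1) (by omega)
  · exact Prod.Lex.right fuel (by omega)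

def average_with_memo (seq : List Int) : Int :=
  ((List.range seq.length).foldl
    (fun st i =>
      let r := pvA seq seq.length i (i+1) 1 st.2
      (max r.1 st.1, r.2))
    ((0 : Int), List.replicate seq.length 0)).1

-- ===== PORT B =====
-- Source B: one pass over reversed(seq); suffix holds (value, LIS-length-starting-there) for the
-- already-processed later elements.  Python's max(..., default=0) is foldl max 0 here: all
-- stored lengths are ≥ 1, so the 0 seed never changes a nonempty maximum.
def average_with_memo_alt (seq : List Int) : Int :=
  (seq.reverse.foldl
    (fun (st : List (Int × Int) × Int) x =>
      let d := 1 + (st.1.filterMap (fun p => if x < p.1 then some p.2 else none)).foldl max 0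
      (st.1 ++ [(x, d)], max st.2 d))
    (([] : List (Int × Int)), (0 : Int))).2

-- ===== PRECONDITION & SPEC =====
def Spec_average_with_memo (seq : List Int) (out : Int) : Prop := out = average_with_memo_alt seq
instance (seq : List Int) (out : Int) : Decidable (Spec_average_with_memo seq out) := by unfold Spec_average_with_memo; infer_instance

-- ===== CLAIM (what is proved, stated in full; the proofs are below) =====
def Claim_equal_average_with_memo : Prop := ∀ (seq : List Int), Dom_average_with_memo seq → Spec_average_with_memo seq (average_with_memo seq)

-- ===== LEMMAS AND PROOFS =====

-- pvG seq index = the pure value of A's max_from(index) (no memo): d starts at 1 and takes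
-- max (pvG j + 1) over j > index with seq[index] < seq[j].
def pvG (seq : List Int) (index : Nat) : Int :=
  (List.range (seq.length - (index+1))).attach.foldl
    (fun d k =>
      if seq.getD index 0 < seq.getD (index+1+k.1) 0 then max (pvG seq (index+1+k.1) + 1) d else d) 1
termination_by seq.length - index
decreasing_by
  have := List.mem_range.mp k.2
  omega

theorem pvG_def' (seq : List Int) (index : Nat) :
    pvG seq index = (List.range (seq.length - (index+1))).foldl
      (fun d k => if seq.getD index 0 < seq.getD (index+1+k) 0 then max (pvG seq (index+1+k) + 1) d else d) 1 := by
  conv_rhs => rw [← List.attach_map_subtype_val (List.range (seq.length - (index+1))), List.foldl_map]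
  rw [pvG.eq_def]

-- the value of A's loop continued from position i with accumulator d
def pvLoopVal (seq : List Int) (index i : Nat) (d : Int) : Int :=
  (List.range (seq.length - i)).foldl
    (fun d k => if seq.getD index 0 < seq.getD (i+k) 0 then max (pvG seq (i+k) + 1) d else d) d

theorem pvLoopVal_stop (seq : List Int) (index i : Nat) (d : Int) (h : seq.length ≤ i) :
    pvLoopVal seq index i d = d := by
  unfold pvLoopVal
  rw [Nat.sub_eq_zero_of_le h]
  rfl

theorem pvLoopVal_step (seq : List Int) (index i : Nat) (d : Int) (h : i < seq.length) :
    pvLoopVal seq index i d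
      = pvLoopVal seq index (i+1) (if seq.getD index 0 < seq.getD i 0 then max (pvG seq i + 1) d else d) := by
  unfold pvLoopVal
  have hm : seq.length - i = (seq.length - (i+1)) + 1 := by omega
  rw [hm, List.range_succ_eq_map, List.foldl_cons, List.foldl_map]
  congr 1
  · funext dd k
    have e : i + (k+1) = i + 1 + k := by omega
    rw [e]

theorem pvG_eq_loopVal (seq : List Int) (index : Nat) :
    pvG seq index = pvLoopVal seq index (index+1) 1 := by
  rw [pvG_def']; rfl

def pvValid (seq memo : List Int) : Prop :=
  memo.length = seq.length ∧ ∀ j, 0 < memo.getD j 0 → memo.getD j 0 = pvG seq j + 1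

theorem getD_set_self (l : List Int) (i : Nat) (v : Int) (h : i < l.length) :
    (l.set i v).getD i 0 = v := by
  simp [List.getD, h]

theorem getD_set_ne (l : List Int) (i : Nat) (v : Int) (j : Nat) (h : ¬ i = j) :
    (l.set i v).getD j 0 = l.getD j 0 := by
  simp [List.getD, h]

theorem pvA_spec (seq : List Int) : ∀ (fuel index i : Nat) (d : Int) (memo : List Int),
    pvValid seq memo → seq.length - i ≤ fuel →
    (pvA seq fuel index i d memo).1 = pvLoopVal seq index i d ∧
      pvValid seq (pvA seq fuel index i d memo).2 := by
  intro fuel index i d memo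
  induction fuel, index, i, d, memo using pvA.induct seq with
  | case1 fuel index i d memo h1 h2 h3 ih =>
    intro hv hf
    rw [pvA.eq_def, dif_pos h1, if_pos h2, if_pos h3]
    have hm : memo.getD i 0 = pvG seq i + 1 := hv.2 i h3
    have := ih hv (by omega)
    rw [pvLoopVal_step seq index i d h1, if_pos h2, ← hm]
    exact this
  | case2 index i d memo h1 h2 h3 =>
    intro _ hf
    omega
  | case3 index i d memo h1 h2 h3 fuel' v memo1 heq ih1 ih2 =>
    intro hv hf
    rw [pvA.eq_def, dif_pos h1, if_pos h2, if_neg h3]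
    simp only [heq]
    obtain ⟨hval, hv1⟩ := (heq ▸ ih1 hv (by omega) : (v, memo1).1 = pvLoopVal seq i (i+1) 1 ∧ pvValid seq (v, memo1).2)
    have hvG : v = pvG seq i := by rw [pvG_eq_loopVal]; exact hval
    have hv2 : pvValid seq (memo1.set i (v+1)) := by
      constructor
      · rw [List.length_set]; exact hv1.1
      · intro j hj
        by_cases hij : i = j
        · subst hij
          rw [getD_set_self memo1 i (v+1) (by rw [hv1.1]; exact h1)] at hj ⊢
          rw [hvG]
        · rw [getD_set_ne memo1 i (v+1) j hij] at hj ⊢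
          exact hv1.2 j hj
    rw [pvLoopVal_step seq index i d h1, if_pos h2, ← hvG]
    exact ih2 hv2 (by omega)
  | case4 fuel index i d memo h1 h2 ih =>
    intro hv hf
    rw [pvA.eq_def, dif_pos h1, if_neg h2]
    have := ih hv (by omega)
    rw [pvLoopVal_step seq index i d h1, if_neg h2]
    exact this
  | case5 fuel index i d memo h1 =>
    intro hv _
    rw [pvA.eq_def, dif_neg h1]
    exact ⟨(pvLoopVal_stop seq index i d (by omega)).symm, hv⟩

theorem A_outer (seq : List Int) : ∀ (l : List Nat) (a : Int) (memo : List Int),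
    pvValid seq memo →
    ((l.foldl (fun st i =>
        let r := pvA seq seq.length i (i+1) 1 st.2
        (max r.1 st.1, r.2)) ((a : Int), memo)).1
      = l.foldl (fun m i => max (pvG seq i) m) a) := by
  intro l
  induction l with
  | nil => intro a memo _; rfl
  | cons x t ih =>
    intro a memo hv
    have h := pvA_spec seq seq.length x (x+1) 1 memo hv (by omega)
    have hx : (pvA seq seq.length x (x+1) 1 memo).1 = pvG seq x := by
      rw [h.1, ← pvG_eq_loopVal]
    simp only [List.foldl_cons]
    show (List.foldl _ (max (pvA seq seq.length x (x+1) 1 memo).1 a,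
        (pvA seq seq.length x (x+1) 1 memo).2) t).1 = List.foldl _ (max (pvG seq x) a) t
    rw [hx]
    exact ih _ _ h.2

theorem A_eq (seq : List Int) :
    average_with_memo seq = (List.range seq.length).foldl (fun m i => max (pvG seq i) m) 0 := by
  unfold average_with_memo
  apply A_outer
  constructor
  · exact List.length_replicate
  · intro j hj
    by_cases hjn : j < seq.length
    · rw [List.getD_eq_getElem _ _ (by simpa using hjn), List.getElem_replicate] at hj
      omega
    · rw [List.getD_eq_default _ _ (by simpa using hjn)] at hj
      omega

-- fold-shape lemmas
theorem fold_add_one (l : List Nat) (c : Nat → Prop) [DecidablePred c] (g : Nat → Int) :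
    ∀ a : Int, l.foldl (fun d k => if c k then max (g k + 1) d else d) (a+1)
      = 1 + l.foldl (fun m k => if c k then max (g k) m else m) a := by
  induction l with
  | nil => intro a; simp only [List.foldl_nil]; omega
  | cons x t ih =>
    intro a
    simp only [List.foldl_cons]
    by_cases hx : c x
    · simp only [hx, if_true]
      rw [Int.max_add_right (g x) a 1, ih]
    · simp [hx, ih]

theorem fold_if_filterMap (l : List Nat) (c : Nat → Prop) [DecidablePred c] (g : Nat → Int) :
    ∀ a : Int, l.foldl (fun m k => if c k then max (g k) m else m) a
      = (l.filterMap (fun k => if c k then some (g k) else none)).foldl max a := by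
  induction l with
  | nil => intro a; rfl
  | cons x t ih =>
    intro a
    by_cases hx : c x
    · simp only [List.foldl_cons, List.filterMap_cons, hx, if_true]
      rw [max_comm (g x) a, ih]
    · simp only [List.foldl_cons, List.filterMap_cons, hx, if_false]
      exact ih a

theorem filterMap_range_rev (F : Nat → Option Int) (base : Nat) :
    ∀ m, (List.range m).filterMap (fun k => F (base + (m-1-k)))
      = ((List.range m).filterMap (fun k => F (base + k))).reverse := by
  intro m
  induction m with
  | zero => rfl
  | succ m ih =>
    have hL : List.range (m+1) = 0 :: (List.range m).map Nat.succ := List.range_succ_eq_map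
    have hR : List.range (m+1) = List.range m ++ [m] := List.range_succ
    conv_lhs => rw [hL]
    conv_rhs => rw [hR]
    rw [List.filterMap_cons, List.filterMap_map, List.filterMap_append, List.reverse_append]
    have harg : ∀ k : Nat, (fun k => F (base + (m + 1 - 1 - k))) (Nat.succ k) = F (base + (m-1-k)) := by
      intro k; simp only []; congr 1; omega
    have hcomp : (List.range m).filterMap ((fun k => F (base + (m + 1 - 1 - k))) ∘ Nat.succ)
        = (List.range m).filterMap (fun k => F (base + (m-1-k))) := by
      apply List.filterMap_congr
      intro x _
      exact harg x
    rw [hcomp, ih]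
    have h0 : base + (m + 1 - 1 - 0) = base + m := by omega
    rw [h0]
    cases hF : F (base + m) <;> simp [hF]

theorem foldl_max_out (l : List Int) : ∀ b a : Int, l.foldl max (max b a) = max (l.foldl max b) a := by
  induction l with
  | nil => intro b a; rfl
  | cons x t ih =>
    intro b a
    simp only [List.foldl_cons]
    rw [show max (max b a) x = max (max b x) a by rw [max_right_comm], ih]

theorem foldl_max_reverse (l : List Int) (a : Int) : l.reverse.foldl max a = l.foldl max a := by
  induction l generalizing a with
  | nil => rfl
  | cons x t ih =>
    simp only [List.reverse_cons, List.foldl_append, List.foldl_cons, List.foldl_nil, ih]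
    rw [← foldl_max_out]

-- pvG in B's form: 1 + (max over the qualifying later pvG values, seeded with 0)
theorem pvG_minus_one (seq : List Int) (index : Nat) :
    pvG seq index = 1 + (List.range (seq.length - (index+1))).foldl
      (fun m k => if seq.getD index 0 < seq.getD (index+1+k) 0 then max (pvG seq (index+1+k)) m else m) 0 := by
  rw [pvG_def']
  have := fold_add_one (List.range (seq.length - (index+1)))
    (fun k => seq.getD index 0 < seq.getD (index+1+k) 0) (fun k => pvG seq (index+1+k)) 0
  simpa using this

theorem B_inv (seq : List Int) : ∀ j, j ≤ seq.length →
    ((seq.drop (seq.length - j)).reverse).foldl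
      (fun (st : List (Int × Int) × Int) x =>
        let d := 1 + (st.1.filterMap (fun p => if x < p.1 then some p.2 else none)).foldl max 0
        (st.1 ++ [(x, d)], max st.2 d))
      (([] : List (Int × Int)), (0 : Int))
    = ((List.range j).map (fun k => (seq.getD (seq.length-1-k) 0, pvG seq (seq.length-1-k))),
       (List.range j).foldl (fun m k => max m (pvG seq (seq.length-1-k))) 0) := by
  intro j
  induction j with
  | zero => intro _; simp
  | succ j ih =>
    intro hj
    have hi : seq.length - (j+1) < seq.length := by omega
    have e : seq.length - j = seq.length - (j+1) + 1 := by omega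
    have hdrop : seq.drop (seq.length - (j+1))
        = seq[seq.length - (j+1)] :: seq.drop (seq.length - j) := by
      rw [e]; exact List.drop_eq_getElem_cons hi
    rw [hdrop, List.reverse_cons, List.foldl_append, ih (by omega), List.foldl_cons, List.foldl_nil]
    have hx : seq[seq.length - (j+1)] = seq.getD (seq.length - (j+1)) 0 :=
      (List.getD_eq_getElem seq 0 hi).symm
    -- the new LIS value equals pvG at the index being processed
    have hd : (1 : Int) + (((List.range j).map (fun k => (seq.getD (seq.length-1-k) 0, pvG seq (seq.length-1-k)))).filterMap
          (fun p => if seq[seq.length - (j+1)] < p.1 then some p.2 else none)).foldl max 0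
        = pvG seq (seq.length - (j+1)) := by
      rw [List.filterMap_map]
      set i := seq.length - (j+1) with hidef
      have hji : seq.length - (i+1) = j := by omega
      rw [pvG_minus_one seq i, hji]
      rw [fold_if_filterMap (List.range j) (fun k => seq.getD i 0 < seq.getD (i+1+k) 0)
        (fun k => pvG seq (i+1+k)) 0]
      have hrev := filterMap_range_rev
        (fun j' => if seq.getD i 0 < seq.getD j' 0 then some (pvG seq j') else none) (i+1) j
      simp only [] at hrev
      have hcong : (List.range j).filterMap
          ((fun p => if seq[i] < p.1 then some p.2 else none) ∘
            fun k => (seq.getD (seq.length-1-k) 0, pvG seq (seq.length-1-k)))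
          = (List.range j).filterMap (fun k =>
              if seq.getD i 0 < seq.getD (i+1+(j-1-k)) 0 then some (pvG seq (i+1+(j-1-k))) else none) := by
        apply List.filterMap_congr
        intro k hk
        have hk' := List.mem_range.mp hk
        have hidx : i+1+(j-1-k) = seq.length-1-k := by omega
        rw [hidx, hx]
        simp only [Function.comp_apply, hidef]
      rw [hcong, hrev, foldl_max_reverse]
    simp only []
    rw [hd]
    have hij : seq.length - (j+1) = seq.length - 1 - j := by omega
    rw [List.range_succ, List.map_append, List.foldl_append, List.map_cons, List.map_nil,
      List.foldl_cons, List.foldl_nil, hx, hij]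

theorem B_eq (seq : List Int) :
    average_with_memo_alt seq
      = (List.range seq.length).foldl (fun m k => max m (pvG seq (seq.length-1-k))) 0 := by
  have h := B_inv seq seq.length (le_refl _)
  simp only [Nat.sub_self, List.drop_zero] at h
  unfold average_with_memo_alt
  rw [h]

theorem fold_max_map (l : List Nat) (h : Nat → Int) : ∀ a : Int,
    l.foldl (fun m k => max (h k) m) a = (l.map h).foldl max a := by
  induction l with
  | nil => intro a; rfl
  | cons x t ih =>
    intro a
    simp only [List.foldl_cons, List.map_cons]
    rw [max_comm (h x) a, ih]

theorem fold_max_map' (l : List Nat) (h : Nat → Int) (a : Int) :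
    l.foldl (fun m k => max m (h k)) a = (l.map h).foldl max a := by
  rw [List.foldl_map]

-- ===== VERDICT (by name: the statement is the Claim_ definition above) =====
theorem average_with_memo_spec : Claim_equal_average_with_memo := by
  intro seq _
  unfold Spec_average_with_memo
  rw [A_eq, B_eq]
  rw [fold_max_map _ (pvG seq) 0, fold_max_map' _ (fun k => pvG seq (seq.length-1-k)) 0]
  have hrev : (List.range seq.length).map (fun k => pvG seq (seq.length-1-k))
      = ((List.range seq.length).map (pvG seq)).reverse := by
    have := filterMap_range_rev (fun j => some (pvG seq j)) 0 seq.length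
    simpa [List.filterMap_eq_map] using this
  rw [hrev, foldl_max_reverse]
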